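-- pv_equiv track=rewrite | github.com/shivaAcharya/LeetCode | 2108-find-first-palindromic-string-in-the-array/2108-find-first-palindromic-string-in-the-array.py | firstPalindrome
-- ===== SOURCE A (Python) =====
-- from typing import List
--
-- def firstPalindrome(words: List[str]) -> str:
--
--     def is_palindrome(s):
--         l, r = 0, len(s) - 1
--         while l < r:
--             if s[l] != s[r]:
--                 return False
--             l += 1
--             r -= 1
--         return True
--
--
--     for word in words:
--         if is_palindrome(word):
--             return word
--
--     return ""
-- ===== SOURCE B (Python) =====
-- from typing import List
--
-- def firstPalindrome(words: List[str]) -> str: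
--     # Recursive peel-ends palindrome test: a string is a palindrome iff its
--     # outer characters match and the inner substring is a palindrome.
--     def pal(s):
--         return len(s) < 2 or (s[0] == s[-1] and pal(s[1:-1]))
--
--     # Scan RIGHT-TO-LEFT keeping the last palindrome seen: after the whole
--     # pass the accumulator holds the leftmost palindrome of the list.
--     ans = ""
--     for w in reversed(words):
--         if pal(w):
--             ans = w
--     return ans
-- ===== Notes on version B (the rewrite author's own statement) =====
-- stated objective: alternative
-- what changed: B scans the list right-to-left with an accumulator that keeps the last palindrome seen (the whole list is always traversed, no early return) instead of A's left-to-right early-return scan, and decides palindromicity by recursively peeling both end characters (s[0]==s[-1] and pal(s[1:-1])) instead of A's in-place two-pointer index walk.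
import Mathlib
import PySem

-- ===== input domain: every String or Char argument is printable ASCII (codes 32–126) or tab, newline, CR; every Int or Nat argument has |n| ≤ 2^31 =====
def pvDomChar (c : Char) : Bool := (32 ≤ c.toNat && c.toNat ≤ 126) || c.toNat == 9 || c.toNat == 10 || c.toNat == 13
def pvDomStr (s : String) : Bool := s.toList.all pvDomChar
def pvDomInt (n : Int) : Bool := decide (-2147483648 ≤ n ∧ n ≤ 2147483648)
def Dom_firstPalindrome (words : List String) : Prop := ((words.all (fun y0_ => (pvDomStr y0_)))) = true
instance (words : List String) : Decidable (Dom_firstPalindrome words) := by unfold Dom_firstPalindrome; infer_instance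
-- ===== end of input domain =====

-- B replaces A's left-to-right early-return scan with a right-to-left full pass keeping the
-- last palindrome seen, and decides palindromicity by recursively peeling both end characters
-- instead of A's two-pointer index walk (alternative decomposition, same asymptotic cost here).

-- ===== PORT A =====
-- two-pointer while loop of A's is_palindrome; l < r keeps both indices in range,
-- so getD with a dummy default is exact here
def pvPalGo (cs : List Char) (l r : Nat) : Bool :=
  if l < r then
    if cs.getD l ' ' != cs.getD r ' ' then false
    else pvPalGo cs (l + 1) (r - 1)
  else true
termination_by r - l

def pvIsPalindromeA (s : String) : Bool :=
  pvPalGo s.toList 0 (s.toList.length - 1)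

def firstPalindrome (words : List String) : String :=
  match words with
  | [] => ""
  | w :: ws => if pvIsPalindromeA w then w else firstPalindrome ws

-- ===== PORT B =====
-- B's recursive pal: len(s) < 2 or (s[0] == s[-1] and pal(s[1:-1]));
-- s[1:-1] is PySem.List.slice cs (some 1) (some (-1)); indices 0 and -1 are in range when len ≥ 2
def pvPalB (cs : List Char) : Bool :=
  if cs.length < 2 then true
  else (cs.getD 0 ' ' == cs.getD (cs.length - 1) ' ') &&
       pvPalB (PySem.List.slice cs (some 1) (some (-1)))
termination_by cs.length
decreasing_by
  rename_i h
  have hne : cs ≠ [] := by intro hh; rw [hh] at h; simp at h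
  simp [PySem.List.length_slice, PySem.List.clampIdx, hne]
  omega

-- B's loop: ans = ""; for w in reversed(words): if pal(w): ans = w
def firstPalindrome_alt (words : List String) : String :=
  words.reverse.foldl (fun ans w => if pvPalB w.toList then w else ans) ""

-- ===== PRECONDITION & SPEC =====
def Spec_firstPalindrome (words : List String) (out : String) : Prop := out = firstPalindrome_alt words
instance (words : List String) (out : String) : Decidable (Spec_firstPalindrome words out) := by unfold Spec_firstPalindrome; infer_instance

-- ===== CLAIM (what is proved, stated in full; the proofs are below) =====
def Claim_equal_firstPalindrome : Prop := ∀ (words : List String), Dom_firstPalindrome words → Spec_firstPalindrome words (firstPalindrome words)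

-- ===== LEMMAS AND PROOFS =====

-- Both palindrome predicates equal the whole-list symmetry condition.

theorem pvPalGo_iff (cs : List Char) (l r : Nat) :
    pvPalGo cs l r = true ↔
      ∀ i, l ≤ i → i ≤ r → cs.getD i ' ' = cs.getD (l + r - i) ' ' := by
  induction l, r using pvPalGo.induct cs with
  | case1 l r hlr hne =>
    rw [pvPalGo, if_pos hlr, if_pos hne]
    simp only [Bool.false_eq_true, false_iff]
    intro h
    have := h l (le_refl _) (le_of_lt hlr)
    simp only [Nat.add_sub_cancel_left] at this
    simp only [bne_iff_ne, ne_eq] at hne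
    exact hne this
  | case2 l r hlr hne ih =>
    rw [pvPalGo, if_pos hlr, if_neg hne]
    replace hne : cs.getD l ' ' = cs.getD r ' ' := by simpa using hne
    rw [ih]
    constructor
    · intro h i hli hir
      rcases Nat.eq_or_lt_of_le hli with rfl | hli'
      · simpa [Nat.add_sub_cancel_left] using hne
      · rcases Nat.eq_or_lt_of_le hir with rfl | hir'
        · have : l + i - i = l := by omega
          rw [this]; exact hne.symm
        · have := h i (by omega) (by omega)
          have e : l + 1 + (r - 1) - i = l + r - i := by omega
          rwa [e] at this
    · intro h i hli hir
      have := h i (by omega) (by omega)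
      have e : l + 1 + (r - 1) - i = l + r - i := by omega
      rwa [e]
  | case3 l r hlr =>
    rw [pvPalGo, if_neg hlr]
    simp only [true_iff]
    intro i hli hir
    have : i = l ∧ l = r := by omega
    obtain ⟨rfl, rfl⟩ := this
    congr 1; omega

theorem pvIsPalindromeA_eq (s : String) :
    pvIsPalindromeA s = (s.toList == s.toList.reverse) := by
  set cs := s.toList with hcs
  rcases Nat.eq_zero_or_pos cs.length with hn | hn
  · rw [List.length_eq_zero_iff] at hn
    simp [pvIsPalindromeA, ← hcs, hn, pvPalGo]
  · rw [Bool.eq_iff_iff, pvIsPalindromeA, ← hcs, pvPalGo_iff, beq_iff_eq]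
    constructor
    · intro h
      apply List.ext_getElem (by simp)
      intro i hi hi'
      have := h i (Nat.zero_le _) (by omega)
      rw [List.getD_eq_getElem cs ' ' hi,
          List.getD_eq_getElem cs ' ' (by omega : 0 + (cs.length - 1) - i < cs.length)] at this
      rw [List.getElem_reverse]
      rw [this]; congr 1; omega
    · intro h i h0 hir
      have hi : i < cs.length := by omega
      have hj : 0 + (cs.length - 1) - i < cs.length := by omega
      conv_rhs => rw [h]
      rw [List.getD_eq_getElem cs ' ' hi,
          List.getD_eq_getElem cs.reverse ' ' (by simpa using hj),
          List.getElem_reverse]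
      congr 1
      rw [List.length_reverse]
      omega

theorem pvPalB_iff (cs : List Char) : pvPalB cs = (cs == cs.reverse) := by
  induction cs using pvPalB.induct with
  | case1 cs h =>
    rw [pvPalB, if_pos h]
    match cs, h with
    | [], _ => rfl
    | [a], _ => simp
  | case2 cs h ih =>
    rw [pvPalB, if_neg h]
    obtain ⟨a, mid, b, rfl⟩ : ∃ a mid b, cs = a :: (mid ++ [b]) := by
      match cs, h with
      | x :: rest, h =>
        have hr : rest ≠ [] := by intro hh; subst hh; simp at h
        exact ⟨x, rest.dropLast, rest.getLast hr, by rw [List.dropLast_append_getLast hr]⟩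
    have hslice : PySem.List.slice (a :: (mid ++ [b])) (some 1) (some (-1)) = mid := by
      have hlt : ¬((mid.length : Int) + 1 < 0) := by omega
      simp [PySem.List.slice, PySem.List.clampIdx, hlt]
    rw [hslice] at ih
    have hget0 : (a :: (mid ++ [b])).getD 0 ' ' = a := rfl
    have hlen : (a :: (mid ++ [b])).length - 1 = mid.length + 1 := by simp
    have hgetl : (a :: (mid ++ [b])).getD ((a :: (mid ++ [b])).length - 1) ' ' = b := by
      rw [hlen, List.getD_eq_getElem _ ' ' (by simp : mid.length + 1 < (a :: (mid ++ [b])).length)]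
      simp
    rw [hslice, hget0, hgetl, ih]
    have hrev : (a :: (mid ++ [b])).reverse = b :: (mid.reverse ++ [a]) := by simp
    rw [hrev, Bool.eq_iff_iff]
    simp only [Bool.and_eq_true, beq_iff_eq, List.cons.injEq]
    constructor
    · rintro ⟨rfl, hm⟩
      exact ⟨rfl, by rw [← hm]⟩
    · rintro ⟨rfl, hm⟩
      refine ⟨rfl, ?_⟩
      exact List.append_inj_left' hm (by simp)

-- ===== VERDICT (by name: the statement is the Claim_ definition above) =====
theorem firstPalindrome_spec : Claim_equal_firstPalindrome := by
  intro words hd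
  clear hd
  show firstPalindrome words = firstPalindrome_alt words
  unfold firstPalindrome_alt
  rw [List.foldl_reverse]
  induction words with
  | nil => rfl
  | cons w ws ih =>
    rw [firstPalindrome, List.foldr_cons, pvIsPalindromeA_eq, pvPalB_iff, ih]
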